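-- pv_equiv track=rewrite | github.com/MrBrantCode/unitest_baseline | mut_generate/mist_train_cf/cf_1706/solution.py | count_unique_chars
-- ===== SOURCE A (Python) =====
-- def count_unique_chars(s):
--     unique_chars = set()
--     consecutive_uppercase_count = 0
--     special_char_digit_count = 0
--
--     # Remove whitespace characters from the string
--     s = ''.join(s.split())
--
--     for i in range(len(s)):
--         # Count unique characters
--         unique_chars.add(s[i])
--
--         # Check for consecutive uppercase letters
--         if i > 0 and s[i].isupper() and s[i-1].isupper():
--             consecutive_uppercase_count += 1
--
--         # Check for special characters or digits
--         if not s[i].isalpha():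
--             special_char_digit_count += 1
--
--     return len(s), len(unique_chars), special_char_digit_count, consecutive_uppercase_count
-- ===== SOURCE B (Python) =====
-- def count_unique_chars(s):
--     # Frequency-table approach: drop whitespace, build a per-character counter and a
--     # per-adjacent-bigram counter, then derive every statistic from the tables.
--     t = [c for c in s if not c.isspace()]
--     freq = {}
--     for c in t:
--         freq[c] = freq.get(c, 0) + 1
--     bigram = {}
--     for p in zip(t, t[1:]):
--         bigram[p] = bigram.get(p, 0) + 1
--     length = sum(freq.values())
--     unique = len(freq)
--     special = sum(n for c, n in freq.items() if not c.isalpha())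
--     consecutive = sum(n for (a, b), n in bigram.items() if a.isupper() and b.isupper())
--     return length, unique, special, consecutive
-- ===== Notes on version B (the rewrite author's own statement) =====
-- stated objective: alternative
-- what changed: Instead of A's single fused index loop with running counters, B builds two hash frequency tables (per character and per adjacent bigram of the whitespace-stripped string) and derives all four statistics by aggregating over the tables' distinct keys: length = sum of counts, unique = number of keys, special = sum of counts of non-alpha keys, consecutive = sum of counts of upper-upper bigram keys.
import Mathlib
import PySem

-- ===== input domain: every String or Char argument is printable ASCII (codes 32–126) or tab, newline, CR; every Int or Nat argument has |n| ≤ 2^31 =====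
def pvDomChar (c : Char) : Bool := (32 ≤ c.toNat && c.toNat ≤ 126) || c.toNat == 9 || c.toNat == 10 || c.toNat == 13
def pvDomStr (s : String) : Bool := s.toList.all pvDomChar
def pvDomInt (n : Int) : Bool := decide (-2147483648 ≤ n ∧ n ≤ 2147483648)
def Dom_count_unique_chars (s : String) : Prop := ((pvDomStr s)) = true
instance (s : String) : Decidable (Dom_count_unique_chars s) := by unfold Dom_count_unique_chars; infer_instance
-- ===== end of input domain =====

-- B replaces A's fused index loop with two hash frequency tables (per character, per adjacent
-- bigram) and derives each statistic by aggregating over the tables' distinct keys.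

-- ===== PORT A =====
-- A's loop body: add s[i] to the set, bump the consecutive-uppercase counter on i>0 with
-- s[i], s[i-1] both upper, bump the special counter when s[i] is not alphabetic.
def cucStep (t : List Char) (acc : PySem.Set Char × Int × Int) (i : Int) :
    PySem.Set Char × Int × Int :=
  let a1 : PySem.Set Char × Int × Int := (PySem.Set.add acc.1 (PySem.List.pyGetD t i 'A'), acc.2)
  let a2 : PySem.Set Char × Int × Int :=
    if decide (i > 0) && PySem.Chars.isupper (PySem.List.pyGetD t i 'A')
        && PySem.Chars.isupper (PySem.List.pyGetD t (i - 1) 'A')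
    then (a1.1, a1.2.1 + 1, a1.2.2) else a1
  if !(PySem.Chars.isalpha (PySem.List.pyGetD t i 'A')) then (a2.1, a2.2.1, a2.2.2 + 1) else a2

def count_unique_chars (s : String) : Int × Int × Int × Int :=
  let t := (PySem.Str.join "" (PySem.Str.split₀ s)).toList
  let r := (PySem.List.pyRange 0 (t.length : Int) 1).foldl (cucStep t)
    (PySem.Set.empty, (0 : Int), (0 : Int))
  ((t.length : Int), (PySem.Set.len r.1 : Int), r.2.2, r.2.1)

-- ===== PORT B =====
def count_unique_chars_alt (s : String) : Int × Int × Int × Int :=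
  let t := s.toList.filter (fun c => !PySem.Chars.isspace c)
  let freq := t.foldl (fun d c => d.insert c (d.getD c 0 + 1))
    (PySem.Dict.empty : PySem.Dict Char Int)
  let bigram := (t.zip (t.drop 1)).foldl (fun d p => d.insert p (d.getD p 0 + 1))
    (PySem.Dict.empty : PySem.Dict (Char × Char) Int)
  let length : Int := freq.values.sum
  let unique : Int := (freq.size : Int)
  let special : Int :=
    ((freq.items.filter (fun p => !PySem.Chars.isalpha p.1)).map (·.2)).sum
  let consecutive : Int :=
    ((bigram.items.filter (fun p => PySem.Chars.isupper p.1.1 && PySem.Chars.isupper p.1.2)).map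
      (·.2)).sum
  (length, unique, special, consecutive)

-- ===== PRECONDITION & SPEC =====
def Spec_count_unique_chars (s : String) (out : Int × Int × Int × Int) : Prop := out = count_unique_chars_alt s
instance (s : String) (out : Int × Int × Int × Int) : Decidable (Spec_count_unique_chars s out) := by unfold Spec_count_unique_chars; infer_instance

-- ===== CLAIM (what is proved, stated in full; the proofs are below) =====
def Claim_equal_count_unique_chars : Prop := ∀ (s : String), Dom_count_unique_chars s → Spec_count_unique_chars s (count_unique_chars s)

-- ===== LEMMAS AND PROOFS =====

-- ''.join(parts) is the concatenation of the parts.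
lemma join_nil_eq_flatten (parts : List (List Char)) :
    PySem.Chars.join [] parts = parts.flatten := by
  induction parts with
  | nil => simp [PySem.Chars.join_nil]
  | cons a rest ih =>
    cases rest with
    | nil => simp [PySem.Chars.join_singleton]
    | cons b r => simp [PySem.Chars.join_cons_cons] at ih ⊢; simpa using ih

-- Invariant of split₀'s worker: flattening its output appends the pending word and the
-- non-whitespace characters of the remaining input.
lemma split₀_go_flatten' (cs : List Char) : ∀ (cur : List Char) (acc : List (List Char)),
    (PySem.Chars.split₀.go cs cur acc).flatten
      = acc.reverse.flatten ++ cur.reverse ++ cs.filter (fun c => !PySem.Chars.isspace c) := by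
  induction cs with
  | nil =>
    intro cur acc
    simp only [PySem.Chars.split₀.go]
    by_cases h : cur.isEmpty <;>
      simp_all [List.isEmpty_iff, List.filter_nil]
  | cons c rest ih =>
    intro cur acc
    simp only [PySem.Chars.split₀.go]
    by_cases hsp : PySem.Chars.isspace c
    · by_cases h : cur.isEmpty <;> simp_all [List.isEmpty_iff]
    · simp [hsp, ih]

-- ''.join(s.split()) = the non-whitespace characters of s, in order.
lemma join_split₀_eq_filter (cs : List Char) :
    PySem.Chars.join [] (PySem.Chars.split₀ cs)
      = cs.filter (fun c => !PySem.Chars.isspace c) := by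
  rw [join_nil_eq_flatten, PySem.Chars.split₀]
  simpa using split₀_go_flatten' cs [] []

lemma pyGetD_app_lt (u : List Char) (c : Char) (i : Int) (d : Char) (h0 : 0 ≤ i)
    (h1 : i < u.length) : PySem.List.pyGetD (u ++ [c]) i d = PySem.List.pyGetD u i d := by
  rw [PySem.List.pyGetD_eq_getElem (u ++ [c]) d h0 (by simp; omega),
      PySem.List.pyGetD_eq_getElem u d h0 (by omega)]
  exact List.getElem_append_left (by omega)

lemma pyGetD_app_last (u : List Char) (c : Char) (d : Char) :
    PySem.List.pyGetD (u ++ [c]) (u.length : Int) d = c := by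
  rw [PySem.List.pyGetD_eq_getElem (u ++ [c]) d (by positivity) (by simp)]
  simp

lemma range_split' (n : Nat) :
    PySem.List.pyRange 0 ((n : Int) + 1) 1 = PySem.List.pyRange 0 (n : Int) 1 ++ [(n : Int)] := by
  rw [PySem.List.pyRange_one_append 0 (n : Int) ((n : Int) + 1) (by positivity) (by omega),
      PySem.List.pyRange_one_cons (a := (n : Int)) (b := (n : Int) + 1) (by omega),
      PySem.List.pyRange_one_eq_nil (a := (n : Int) + 1) (b := (n : Int) + 1) (by omega)]

lemma zip_drop_append (u : List Char) (c d : Char) (h : u ≠ []) :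
    (u ++ [c]).zip ((u ++ [c]).drop 1)
      = u.zip (u.drop 1) ++ [(u.getD (u.length - 1) d, c)] := by
  induction u with
  | nil => exact absurd rfl h
  | cons a v ih =>
    cases v with
    | nil => simp [List.getD]
    | cons b w =>
      have := ih (by simp)
      simp only [List.cons_append, List.drop_succ_cons, List.drop_zero] at this ⊢
      simp [List.zip, List.zipWith] at this ⊢
      simpa [List.getD] using this

-- Characterisation of A's fused loop.
lemma cuc_loop (t : List Char) :
    (PySem.List.pyRange 0 (t.length : Int) 1).foldl (cucStep t)
        (PySem.Set.empty, (0 : Int), (0 : Int))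
      = (PySem.Set.ofList t,
         ((t.zip (t.drop 1)).countP
            (fun p => PySem.Chars.isupper p.1 && PySem.Chars.isupper p.2) : Int),
         (t.countP (fun c => !PySem.Chars.isalpha c) : Int)) := by
  induction t using List.reverseRecOn with
  | nil => simp [PySem.List.pyRange_one_eq_nil]
  | append_singleton u c ih =>
    have hL : (((u ++ [c]).length : Nat) : Int) = (u.length : Int) + 1 := by
      push_cast [List.length_append]; simp
    rw [hL, range_split', List.foldl_append]
    have hpre : List.foldl (cucStep (u ++ [c])) (PySem.Set.empty, (0 : Int), (0 : Int))
          (PySem.List.pyRange 0 (u.length : Int) 1)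
        = List.foldl (cucStep u) (PySem.Set.empty, (0 : Int), (0 : Int))
          (PySem.List.pyRange 0 (u.length : Int) 1) := by
      refine PySem.List.foldl_congr_mem _ _ _ _ ?_
      intro acc i hi
      obtain ⟨h0, h1⟩ := PySem.List.mem_pyRange_one.mp hi
      by_cases hp : 0 < i
      · simp only [cucStep, pyGetD_app_lt u c i 'A' h0 h1,
          pyGetD_app_lt u c (i - 1) 'A' (by omega) (by omega)]
      · have h2 : i = 0 := by omega
        subst h2
        simp [cucStep, pyGetD_app_lt u c 0 'A' (by omega) h1]
    rw [hpre, ih]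
    simp only [List.foldl_cons, List.foldl_nil]
    rcases eq_or_ne u [] with hu | hu
    · subst hu; by_cases h3 : PySem.Chars.isalpha c <;> simp [cucStep, h3, PySem.Set.ofList]
    · have hn : 0 < u.length := List.length_pos_iff.mpr hu
      have hgt : ((u.length : Int) > 0) := by exact_mod_cast hn
      have hprev : PySem.List.pyGetD (u ++ [c]) ((u.length : Int) - 1) 'A'
          = u.getD (u.length - 1) 'A' := by
        rw [show ((u.length : Int) - 1) = ((u.length - 1 : Nat) : Int) by omega,
            pyGetD_app_lt u c _ 'A' (by positivity) (by omega)]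
        simp
      simp only [cucStep, pyGetD_app_last, hprev, PySem.Set.ofList_append_singleton,
        zip_drop_append u c 'A' hu, List.countP_append, List.countP_cons, List.countP_nil,
        decide_eq_true hgt, Bool.true_and]
      by_cases h1 : PySem.Chars.isupper c <;>
      by_cases h2 : PySem.Chars.isupper (u[u.length - 1]?.getD 'A') <;>
      by_cases h3 : PySem.Chars.isalpha c <;>
        simp [h1, h2, h3, List.drop_one, Int.add_comm]

-- List.count is the same function under any lawful BEq instance.
lemma count_bridge {α : Type} [BEq α] [LawfulBEq α] [DecidableEq α] (a : α) (l : List α) :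
    List.count a l = @List.count α (instBEqOfDecidableEq (α := α)) a l := by
  induction l with
  | nil => rfl
  | cons b m ih =>
    simp only [List.count_cons, ih]
    by_cases h : b = a <;> simp [h, beq_iff_eq]

-- set(l) (first occurrences) is a permutation of Mathlib's dedup (last occurrences).
lemma ofList_perm_dedup {α : Type} [BEq α] [LawfulBEq α] [DecidableEq α] (l : List α) :
    (PySem.Set.ofList l).Perm l.dedup := by
  refine (List.perm_ext_iff_of_nodup (PySem.Set.nodup_ofList l) l.nodup_dedup).mpr ?_
  intro a
  simp [PySem.Set.mem_ofList, List.mem_dedup]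

-- Summing the counter's values over the keys satisfying p counts the elements satisfying p.
lemma sum_counts_filter {α : Type} [BEq α] [LawfulBEq α] [DecidableEq α]
    (l : List α) (p : α → Bool) :
    ((((PySem.Set.ofList l).filter p).map (fun k => (List.count k l : Int)))).sum
      = (l.countP p : Int) := by
  simp only [count_bridge]
  have hperm : (((PySem.Set.ofList l).filter p).map
        (fun k => @List.count α (instBEqOfDecidableEq (α := α)) k l)).Perm
      ((l.dedup.filter p).map (fun k => @List.count α (instBEqOfDecidableEq (α := α)) k l)) :=
    ((ofList_perm_dedup l).filter p).map _
  have hsum : (((PySem.Set.ofList l).filter p).map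
        (fun k => @List.count α (instBEqOfDecidableEq (α := α)) k l)).sum
      = l.countP p := by
    rw [hperm.sum_eq, List.sum_map_count_dedup_filter_eq_countP]
  calc ((((PySem.Set.ofList l).filter p).map
          (fun k => ((@List.count α (instBEqOfDecidableEq (α := α)) k l : Nat) : Int)))).sum
      = ((((PySem.Set.ofList l).filter p).map
            (fun k => @List.count α (instBEqOfDecidableEq (α := α)) k l)).map
          (fun n : Nat => (n : Int))).sum := by simp [List.map_map, Function.comp_def]
    _ = ((((((PySem.Set.ofList l).filter p).map
            (fun k => @List.count α (instBEqOfDecidableEq (α := α)) k l)).sum : Nat)) : Int) :=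
        (Nat.cast_list_sum _).symm
    _ = (l.countP p : Int) := by rw [hsum]

-- Summing all of the counter's values gives the list's length.
lemma sum_counts_all {α : Type} [BEq α] [LawfulBEq α] [DecidableEq α] (l : List α) :
    (((PySem.Set.ofList l).map (fun k => (List.count k l : Int)))).sum = (l.length : Int) := by
  have h := sum_counts_filter l (fun _ => true)
  simpa [List.filter_true, List.countP_true] using h

-- The three table aggregations of B, in closed form.
lemma table_values_sum {α : Type} [BEq α] [LawfulBEq α] [DecidableEq α] (l : List α) :
    (PySem.Dict.counter l).values.sum = (l.length : Int) := by
  rw [show (PySem.Dict.counter l).values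
        = (PySem.Dict.counter l).items.map (fun p => p.2) from rfl,
      PySem.Dict.items_counter, List.map_map]
  simpa using sum_counts_all l

lemma table_size {α : Type} [BEq α] [LawfulBEq α] (l : List α) :
    (PySem.Dict.counter l).size = (PySem.Set.ofList l).length := by
  rw [show (PySem.Dict.counter l).size = (PySem.Dict.counter l).items.length from rfl,
      PySem.Dict.items_counter, List.length_map]

lemma table_filter_sum {α : Type} [BEq α] [LawfulBEq α] [DecidableEq α]
    (l : List α) (p : α → Bool) :
    (((PySem.Dict.counter l).items.filter (fun q => p q.1)).map (·.2)).sum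
      = (l.countP p : Int) := by
  rw [PySem.Dict.items_counter, List.filter_map, List.map_map]
  simpa using sum_counts_filter l p

-- ===== VERDICT (by name: the statement is the Claim_ definition above) =====
theorem count_unique_chars_spec : Claim_equal_count_unique_chars := by
  intro s _
  unfold Spec_count_unique_chars count_unique_chars count_unique_chars_alt
  have hT : (PySem.Str.join "" (PySem.Str.split₀ s)).toList
      = s.toList.filter (fun c => !PySem.Chars.isspace c) := by
    rw [PySem.Str.toList_join]
    simpa [PySem.Str.split₀_map_toList] using join_split₀_eq_filter s.toList
  rw [hT]
  simp only [cuc_loop, PySem.Dict.foldl_insert_getD_add_one_eq_counter,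
    table_values_sum, table_size]
  rw [table_filter_sum _ (fun c => !PySem.Chars.isalpha c),
    table_filter_sum _ (fun q : Char × Char => PySem.Chars.isupper q.1 && PySem.Chars.isupper q.2)]
  rfl
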